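-- pv_equiv track=rewrite | github.com/jvlmdr/aoc-py-2023 | day21/part1.py | parse_garden_map
-- ===== SOURCE A (Python) =====
-- def parse_garden_map(input_map):
--     garden_map = [list(line.strip()) for line in input_map.strip().split('\n')]
--
--     for r, row in enumerate(garden_map):
--         for c, cell in enumerate(row):
--             if cell == 'S':
--                 garden_map[r][c] = '.'
--                 return garden_map, (r, c)
--
--     raise ValueError("No starting position found")
-- ===== SOURCE B (Python) =====
-- def parse_garden_map(input_map):
--     lines = [line.strip() for line in input_map.strip().split('\n')]
--     flat = ''.join(lines)
--     i = flat.find('S')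
--     if i == -1:
--         raise ValueError("No starting position found")
--     r = 0
--     while i >= len(lines[r]):
--         i -= len(lines[r])
--         r += 1
--     grid = [list(l) for l in lines]
--     grid[r][i] = '.'
--     return grid, (r, i)
-- ===== Notes on version B (the rewrite author's own statement) =====
-- stated objective: alternative
-- what changed: B replaces A's nested row-by-row, cell-by-cell scan with a single find on the concatenation of all stripped rows followed by an arithmetic decode of the flat index into (row, column) by subtracting row lengths; the grid is only built and patched afterwards.
import Mathlib
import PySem

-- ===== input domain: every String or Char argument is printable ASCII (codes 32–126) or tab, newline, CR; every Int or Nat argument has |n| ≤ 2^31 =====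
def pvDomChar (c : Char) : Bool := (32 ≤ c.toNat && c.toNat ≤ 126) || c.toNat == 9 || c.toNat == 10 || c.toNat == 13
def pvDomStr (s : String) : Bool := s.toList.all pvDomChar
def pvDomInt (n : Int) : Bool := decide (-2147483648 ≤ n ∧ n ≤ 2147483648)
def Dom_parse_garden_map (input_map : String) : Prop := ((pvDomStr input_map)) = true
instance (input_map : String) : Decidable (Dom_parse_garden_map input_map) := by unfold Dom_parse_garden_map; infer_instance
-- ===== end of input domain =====

-- B finds the start marker with ONE search of the concatenation of all rows and then decodes the
-- flat index into (row, column) by subtracting row lengths, instead of A's nested row-by-row,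
-- cell-by-cell scan of the grid; same return value wherever A returns; no argument is mutated.

-- ===== PORT A =====
-- list(line.strip()) : each character becomes a one-character string
def pgmRow (line : String) : List String :=
  (PySem.Str.strip line).toList.map (fun ch => String.ofList [ch])

-- [list(line.strip()) for line in input_map.strip().split('\n')]  (split? is some: sep "\n" ≠ "")
def pgmBuild (input_map : String) : List (List String) :=
  ((PySem.Str.split? (PySem.Str.strip input_map) "\n").getD []).map pgmRow

-- inner loop: for c, cell in enumerate(row): compare each cell with 'S'
def pgmFindCell : List String → Nat → Option Nat
  | [], _ => none
  | cell :: rest, c => if cell = "S" then some c else pgmFindCell rest (c + 1)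

-- outer loop over enumerate(garden_map); the [] case is Python's raise ValueError (outside Pre_)
def pgmScan (g : List (List String)) : List (List String) → Nat → List (List String) × (Int × Int)
  | [], _ => ([], (0, 0))
  | row :: rest, r =>
    match pgmFindCell row 0 with
    | some c => (g.set r (row.set c "."), ((r : Int), (c : Int)))
    | none => pgmScan g rest (r + 1)

def parse_garden_map (input_map : String) : List (List String) × (Int × Int) :=
  let garden_map := pgmBuild input_map
  pgmScan garden_map garden_map 0

-- ===== PORT B =====
-- lines = [line.strip() for line in input_map.strip().split('\n')]
def pgmLines (input_map : String) : List String :=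
  ((PySem.Str.split? (PySem.Str.strip input_map) "\n").getD []).map PySem.Str.strip

-- while i >= len(lines[r]): i -= len(lines[r]); r += 1   — structural recursion on the rows not
-- yet stepped over; the [] case is Python's IndexError, unreachable when i indexes into the
-- concatenation of the rows
def pgmLocate : List String → Int → Nat → Nat × Int
  | [], i, r => (r, i)
  | l :: rest, i, r =>
    if PySem.Str.len l ≤ i then pgmLocate rest (i - PySem.Str.len l) (r + 1) else (r, i)

def parse_garden_map_alt (input_map : String) : List (List String) × (Int × Int) :=
  let lines := pgmLines input_map
  let flat := PySem.Str.join "" lines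
  let i := PySem.Str.find flat "S"
  if i = -1 then ([], (0, 0))   -- raise ValueError (outside Pre_)
  else
    let rc := pgmLocate lines i 0
    let grid := lines.map (fun l => l.toList.map (fun ch => String.ofList [ch]))
    (grid.set rc.1 ((grid.getD rc.1 []).set rc.2.toNat "."), ((rc.1 : Int), rc.2))

-- ===== PRECONDITION & SPEC =====
-- Pre_ excludes exactly the inputs containing no 'S', on which Python A raises ValueError
-- (stripping and splitting never remove that non-whitespace character, so it survives into the
-- grid iff it occurs in the input; the ports happen to agree there too, so the proof needs no
-- hypothesis, but Python A raises).
def Pre_parse_garden_map (input_map : String) : Prop := 'S' ∈ input_map.toList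
instance (input_map : String) : Decidable (Pre_parse_garden_map input_map) := by
  unfold Pre_parse_garden_map; infer_instance
def pvWitness_parse_garden_map : String := ".#.\n.S.\n..."
def Spec_parse_garden_map (input_map : String) (out : List (List String) × (Int × Int)) : Prop := out = parse_garden_map_alt input_map
instance (input_map : String) (out : List (List String) × (Int × Int)) : Decidable (Spec_parse_garden_map input_map out) := by unfold Spec_parse_garden_map; infer_instance

-- ===== CLAIM (what is proved, stated in full; the proofs are below) =====
def Claim_equal_parse_garden_map : Prop := ∀ (input_map : String), Dom_parse_garden_map input_map → Pre_parse_garden_map input_map → Spec_parse_garden_map input_map (parse_garden_map input_map)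

-- ===== LEMMAS AND PROOFS =====

-- proof-only characterisation: the row-major first occurrence of 'S' (absolute row, column, line)
def rowFind : List String → Nat → Option (Nat × Nat × String)
  | [], _ => none
  | l :: rest, r =>
    if 'S' ∈ l.toList then some (r, List.findIdx (fun ch => ch = 'S') l.toList, l)
    else rowFind rest (r + 1)

theorem pgm_ofList_singleton_eq_S (c : Char) : (String.ofList [c] = "S") ↔ c = 'S' := by
  constructor
  · intro h; have := congrArg String.toList h; simpa using this
  · intro h; subst h; rfl

-- A's inner loop on list(line) finds the first index of 'S'
theorem pgmFindCell_map (chars : List Char) (k : Nat) :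
    pgmFindCell (chars.map (fun ch => String.ofList [ch])) k =
      if 'S' ∈ chars then some (k + List.findIdx (fun ch => ch = 'S') chars) else none := by
  induction chars generalizing k with
  | nil => simp [pgmFindCell]
  | cons c cs ih =>
    by_cases hc : c = 'S'
    · subst hc
      simp [pgmFindCell, List.findIdx_cons]
    · have h1 : ¬ (String.ofList [c] = "S") := by
        simp [pgm_ofList_singleton_eq_S, hc]
      simp only [List.map_cons, pgmFindCell, if_neg h1, ih, List.mem_cons, List.findIdx_cons]
      by_cases hm : 'S' ∈ cs
      · simp [hm, hc, eq_comm]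
        omega
      · simp [hm, hc, eq_comm]

-- A's two nested loops, row by row, compute rowFind
theorem pgmScan_eq (ls : List String) (g : List (List String)) (r : Nat) :
    pgmScan g (ls.map (fun l => l.toList.map (fun ch => String.ofList [ch]))) r =
      (match rowFind ls r with
       | some (rr, c, line) =>
         (g.set rr ((line.toList.map (fun ch => String.ofList [ch])).set c "."),
          ((rr : Int), (c : Int)))
       | none => ([], (0, 0))) := by
  induction ls generalizing r with
  | nil => simp [pgmScan, rowFind]
  | cons line rest ih =>
    have hA := pgmFindCell_map line.toList 0
    by_cases hm : 'S' ∈ line.toList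
    · rw [if_pos hm] at hA
      simp only [List.map_cons, pgmScan, rowFind, hA, if_pos hm]
      simp
    · rw [if_neg hm] at hA
      simp only [List.map_cons, pgmScan, rowFind, hA, if_neg hm]
      exact ih (r + 1)

-- ''.join is concatenation
theorem join_empty (L : List (List Char)) : PySem.Chars.join [] L = L.flatten := by
  induction L with
  | nil => simp [PySem.Chars.join, List.intercalate]
  | cons x t ih =>
    simp only [PySem.Chars.join, List.intercalate] at *
    cases t with
    | nil => simp
    | cons y s => simp_all [List.intersperse]

-- singleton prefix
theorem pgm_singleton_prefix (xs : List Char) :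
    ['S'] <+: xs ↔ xs.head? = some 'S' := by
  cases xs with
  | nil => simp
  | cons x t =>
    constructor
    · rintro ⟨u, hu⟩
      simp at hu
      simp [← hu.1]
    · intro h
      simp at h
      exact ⟨t, by simp [h]⟩

-- str.find with a single-character needle is the first index of that character
theorem pgm_find_singleton (chars : List Char) :
    PySem.Chars.find chars ['S'] =
      if 'S' ∈ chars then ((List.findIdx (fun ch => ch = 'S') chars : Nat) : Int) else -1 := by
  by_cases hm : 'S' ∈ chars
  · have hinf : ['S'] <:+: chars := by
      obtain ⟨u, v, huv⟩ := List.append_of_mem hm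
      exact ⟨u, v, by simp [huv]⟩
    have hne : PySem.Chars.find chars ['S'] ≠ -1 := by
      rw [ne_eq, PySem.Chars.find_eq_neg_one_iff]
      exact fun hcon => hcon hinf
    have hge : 0 ≤ PySem.Chars.find chars ['S'] := by
      have := PySem.Chars.neg_one_le_find chars ['S']
      omega
    obtain ⟨hpre, hmin⟩ := PySem.Chars.find_spec hge
    set t := (PySem.Chars.find chars ['S']).toNat with ht
    have hth : chars[t]? = some 'S' := by
      have := (pgm_singleton_prefix _).mp hpre
      rwa [List.head?_drop] at this
    rw [List.getElem?_eq_some_iff] at hth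
    obtain ⟨htlt, htS⟩ := hth
    have hfi : List.findIdx (fun ch => ch = 'S') chars = t := by
      rw [List.findIdx_eq htlt]
      refine ⟨by simp [htS], fun j hj => ?_⟩
      have hj2 := hmin j hj
      by_contra hb
      simp only [Bool.not_eq_false, decide_eq_true_eq] at hb
      apply hj2
      rw [pgm_singleton_prefix, List.head?_drop,
          List.getElem?_eq_getElem (show j < chars.length by omega)]
      simp [hb]
    rw [if_pos hm, hfi, ht]
    omega
  · rw [if_neg hm, PySem.Chars.find_eq_neg_one_iff]
    intro hcon
    exact hm (hcon.sublist.mem (by simp))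

-- no 'S' anywhere: rowFind fails
theorem rowFind_none (ls : List String) (r : Nat)
    (h : ∀ l ∈ ls, 'S' ∉ l.toList) : rowFind ls r = none := by
  induction ls generalizing r with
  | nil => rfl
  | cons l rest ih =>
    rw [rowFind, if_neg (h l (by simp))]
    exact ih (r + 1) (fun x hx => h x (by simp [hx]))

-- B's index-decoding loop, fed the flat first index, reaches rowFind's coordinates
theorem pgmLocate_eq (ls : List String) (r rr c : Nat) (line : String)
    (hfr : rowFind ls r = some (rr, c, line))
    (hmem : 'S' ∈ (ls.map String.toList).flatten) :
    pgmLocate ls ((List.findIdx (fun ch => ch = 'S') (ls.map String.toList).flatten : Nat) : Int) r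
      = (rr, (c : Int)) := by
  induction ls generalizing r with
  | nil => simp at hmem
  | cons l rest ih =>
    have hflat : ((l :: rest).map String.toList).flatten
        = l.toList ++ (rest.map String.toList).flatten := by simp
    by_cases hm : 'S' ∈ l.toList
    · rw [rowFind, if_pos hm] at hfr
      simp only [Option.some_inj, Prod.mk.injEq] at hfr
      obtain ⟨h1, h2, _⟩ := hfr
      have hlt : List.findIdx (fun ch => ch = 'S') l.toList < l.toList.length :=
        List.findIdx_lt_length.mpr ⟨'S', hm, by simp⟩
      have hidx : List.findIdx (fun ch => ch = 'S') ((l :: rest).map String.toList).flatten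
          = List.findIdx (fun ch => ch = 'S') l.toList := by
        rw [hflat, List.findIdx_append, if_pos hlt]
      rw [hidx, pgmLocate, if_neg (by rw [PySem.Str.len_eq]; omega), ← h1, ← h2]
    · rw [rowFind, if_neg hm] at hfr
      have hnlt : ¬ List.findIdx (fun ch => ch = 'S') l.toList < l.toList.length := by
        intro hcon
        obtain ⟨x, hx, hpx⟩ := List.findIdx_lt_length.mp hcon
        simp at hpx
        exact hm (hpx ▸ hx)
      have hidx : List.findIdx (fun ch => ch = 'S') ((l :: rest).map String.toList).flatten
          = List.findIdx (fun ch => ch = 'S') (rest.map String.toList).flatten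
            + l.toList.length := by
        rw [hflat, List.findIdx_append, if_neg hnlt]
      have hmem' : 'S' ∈ (rest.map String.toList).flatten := by
        rw [hflat] at hmem
        rcases List.mem_append.mp hmem with h | h
        · exact absurd h hm
        · exact h
      rw [hidx, pgmLocate, if_pos (by rw [PySem.Str.len_eq]; push_cast; omega)]
      have hsub : (((List.findIdx (fun ch => ch = 'S') (rest.map String.toList).flatten
            + l.toList.length : Nat) : Int)) - PySem.Str.len l
          = ((List.findIdx (fun ch => ch = 'S') (rest.map String.toList).flatten : Nat) : Int) := by
        rw [PySem.Str.len_eq]; push_cast; omega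
      rw [hsub]
      exact ih (r + 1) hfr hmem'

-- rowFind succeeds when 'S' occurs somewhere in the grid
theorem rowFind_of_mem (ls : List String) (r : Nat)
    (hmem : 'S' ∈ (ls.map String.toList).flatten) : rowFind ls r ≠ none := by
  induction ls generalizing r with
  | nil => simp at hmem
  | cons l rest ih =>
    rw [rowFind]
    by_cases hm : 'S' ∈ l.toList
    · rw [if_pos hm]; simp
    · rw [if_neg hm]
      apply ih (r + 1)
      have : ((l :: rest).map String.toList).flatten
          = l.toList ++ (rest.map String.toList).flatten := by simp
      rw [this] at hmem
      rcases List.mem_append.mp hmem with h | h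
      · exact absurd h hm
      · exact h

-- a successful rowFind records position, line and column
theorem rowFind_some (ls : List String) (r rr c : Nat) (line : String)
    (h : rowFind ls r = some (rr, c, line)) :
    r ≤ rr ∧ ls[rr - r]? = some line ∧ 'S' ∈ line.toList ∧
      c = List.findIdx (fun ch => ch = 'S') line.toList := by
  induction ls generalizing r with
  | nil => simp [rowFind] at h
  | cons l rest ih =>
    rw [rowFind] at h
    by_cases hm : 'S' ∈ l.toList
    · rw [if_pos hm] at h
      simp only [Option.some_inj, Prod.mk.injEq] at h
      obtain ⟨h1, h2, h3⟩ := h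
      subst h1; subst h3
      refine ⟨le_refl _, by simp, hm, h2.symm⟩
    · rw [if_neg hm] at h
      obtain ⟨hle, hget, hmem, hc⟩ := ih (r + 1) h
      refine ⟨by omega, ?_, hmem, hc⟩
      have : rr - r = (rr - (r + 1)) + 1 := by omega
      rw [this, List.getElem?_cons_succ]
      exact hget

-- ===== VERDICT (by name: the statement is the Claim_ definition above) =====
theorem parse_garden_map_spec : Claim_equal_parse_garden_map := by
  intro input_map _ _
  unfold Spec_parse_garden_map parse_garden_map parse_garden_map_alt pgmBuild pgmLines
  dsimp only
  set ls := ((PySem.Str.split? (PySem.Str.strip input_map) "\n").getD []).map PySem.Str.strip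
    with hls
  have hrow : (((PySem.Str.split? (PySem.Str.strip input_map) "\n").getD []).map pgmRow)
      = ls.map (fun l => l.toList.map (fun ch => String.ofList [ch])) := by
    simp [hls, pgmRow, List.map_map]
  have hflatL : (PySem.Str.join "" ls).toList = (ls.map String.toList).flatten := by
    rw [PySem.Str.toList_join, show (("" : String).toList = ([] : List Char)) from rfl, join_empty]
  have hfind : PySem.Str.find (PySem.Str.join "" ls) "S"
      = PySem.Chars.find (ls.map String.toList).flatten ['S'] := by
    rw [PySem.Str.find_eq, hflatL]; rfl
  rw [hrow, pgmScan_eq]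
  by_cases hmem : 'S' ∈ (ls.map String.toList).flatten
  · have hi : PySem.Str.find (PySem.Str.join "" ls) "S"
        = ((List.findIdx (fun ch => ch = 'S') (ls.map String.toList).flatten : Nat) : Int) := by
      rw [hfind, pgm_find_singleton, if_pos hmem]
    rcases hfr : rowFind ls 0 with _ | ⟨rr, c, line⟩
    · exact absurd hfr (rowFind_of_mem ls 0 hmem)
    · rw [hi, if_neg (by omega), pgmLocate_eq ls 0 rr c line hfr hmem]
      obtain ⟨_, hget, _, _⟩ := rowFind_some ls 0 rr c line hfr
      simp only [Nat.sub_zero] at hget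
      have hgetD : (ls.map (fun l => l.toList.map (fun ch => String.ofList [ch]))).getD rr []
          = line.toList.map (fun ch => String.ofList [ch]) := by
        rw [List.getD_eq_getElem?_getD, List.getElem?_map, hget]
        rfl
      simp only [hgetD, Int.toNat_natCast]
  · have hi : PySem.Str.find (PySem.Str.join "" ls) "S" = -1 := by
      rw [hfind, pgm_find_singleton, if_neg hmem]
    have hrf : rowFind ls 0 = none := by
      apply rowFind_none
      intro l hl hS
      exact hmem (List.mem_flatten.mpr ⟨l.toList, List.mem_map_of_mem hl, hS⟩)
    rw [hi, if_pos rfl, hrf]
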